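/- GENERATED by farm/mkstatement.py from design/units.tsv (unit `stb_vorbis_open_memory`) and the Specs of Vorbis/Spec/*.lean — do not edit.
   THE STATEMENT of the proof unit `stb_vorbis_open_memory`: the function `stb_vorbis_open_memory` (92 instructions) satisfies its contract,
   given the contracts of its callees. What the names mean: Vorbis/Spec/Basic.lean. The theorem to prove:
   `theorem stb_vorbis_open_memory_ok : Vorbis.Spec.stb_vorbis_open_memory.Statement`. -/
import Vorbis.Spec.Alloc
import Vorbis.Spec.Libc
import Vorbis.Spec.Runtime
import Vorbis.Spec.StartDecoderAt
import Vorbis.Spec.Top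
namespace Vorbis.Spec.stb_vorbis_open_memory
open X86 X86.User Asan

/-- The statement of unit `stb_vorbis_open_memory`. -/
def Statement : Prop :=
  ∀ (Lay : Layout) (_hLay : Lay.hi = 0x1000000) (μ : Microarch) (_hμ : UserX.MicroOK μ) (u₀ : State)
    (_hcode : HasCodeNat Lay u₀ Vorbis.L.stb_vorbis_open_memory.entry Vorbis.Code.code_stb_vorbis_open_memory.nat Vorbis.L.stb_vorbis_open_memory.size)
    (_h_vorbis_init : ∀ (others : List Obj) (frames : List (Nat × FrameLayout)) (B len : Nat), Calls Lay μ Vorbis.WayInv (Vorbis.conv u₀) Vorbis.L.vorbis_init.entry (Vorbis.Spec.vorbis_init.spec others frames B len))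
    (_h_start_decoder : ∀ (len : Nat) (A0 : Arena × List Obj) (frames : List (Nat × FrameLayout)), Calls Lay μ Vorbis.WayInv (Vorbis.conv u₀) Vorbis.L.start_decoder.entry (Vorbis.Spec.start_decoder.spec len A0 frames))
    (_h_vorbis_alloc : ∀ (others : List Obj) (frames : List (Nat × FrameLayout)) (A : Arena), Calls Lay μ Vorbis.WayInv (Vorbis.conv u₀) Vorbis.L.vorbis_alloc.entry (Vorbis.Spec.vorbis_alloc.spec others frames A))
    (_h_asan_storeN_noabort : Calls Lay μ Vorbis.WayInv (Vorbis.conv u₀) Vorbis.L.__asan_storeN_noabort.entry Asan.checkNSpec)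
    (_h_memcpy : ∀ (others : List Obj) (frames : List (Nat × FrameLayout)), Calls Lay μ Vorbis.WayInv (Vorbis.conv u₀) Vorbis.L.memcpy.entry (Vorbis.Spec.memcpy.spec others frames))
    (_h_vorbis_pump_first_frame : ∀ (others : List Obj) (frames : List (Nat × FrameLayout)) (len : Nat) (A : Arena) (stored room : Int) (ysz : Nat → Nat), Calls Lay μ Vorbis.WayInv (Vorbis.conv u₀) Vorbis.L.vorbis_pump_first_frame.entry (Vorbis.Spec.vorbis_pump_first_frame.spec others frames len A stored room ysz))
    (_h_asan_store4_noabort : Asan.SmallCheck Lay μ Vorbis.WayInv (Vorbis.CodeOK u₀) [.rax, .rcx, .rdx] 4 Vorbis.L.__asan_store4_noabort.entry)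
    (_h_vorbis_deinit : ∀ (others : List Obj) (frames : List (Nat × FrameLayout)) (Blk : Block → Prop), Calls Lay μ Vorbis.WayInv (Vorbis.conv u₀) Vorbis.L.vorbis_deinit.entry (Vorbis.Spec.vorbis_deinit.spec others frames Blk)),
    ∀ (others : List Obj) (frames : List (Nat × FrameLayout)) (len : Nat), Calls Lay μ Vorbis.WayInv (Vorbis.conv u₀) Vorbis.L.stb_vorbis_open_memory.entry (Vorbis.Spec.stb_vorbis_open_memory.spec others frames len)

end Vorbis.Spec.stb_vorbis_open_memory
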